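-- pv_equiv track=rewrite | github.com/ai-dragonfly/mcp-local-server | src/tools/_ship_tracker/utils.py | get_ship_type_name
-- ===== SOURCE A (Python) =====
-- def get_ship_type_name(ship_type: int) -> str:
--     """Get human-readable ship type name from AIS type code.
--
--     Args:
--         ship_type: AIS ship type code (0-99)
--
--     Returns:
--         Human-readable ship type name
--     """
--     type_ranges = {
--         (20, 29): "Wing in ground",
--         (30, 30): "Fishing",
--         (31, 31): "Towing",
--         (32, 32): "Towing (large)",
--         (33, 33): "Dredging/underwater ops",
--         (34, 34): "Diving ops",
--         (35, 35): "Military ops",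
--         (36, 36): "Sailing",
--         (37, 37): "Pleasure craft",
--         (40, 49): "High speed craft",
--         (50, 50): "Pilot vessel",
--         (51, 51): "Search and rescue",
--         (52, 52): "Tug",
--         (53, 53): "Port tender",
--         (54, 54): "Anti-pollution",
--         (55, 55): "Law enforcement",
--         (58, 58): "Medical transport",
--         (59, 59): "Non-combatant ship",
--         (60, 69): "Passenger",
--         (70, 79): "Cargo",
--         (80, 89): "Tanker",
--         (90, 99): "Other",
--     }
--
--     for (min_type, max_type), name in type_ranges.items():
--         if min_type <= ship_type <= max_type:
--             return name
--
--     return "Unknown"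
-- ===== SOURCE B (Python) =====
-- _SHIP_TYPE_NAMES = {
--     20: 'Wing in ground',
--     21: 'Wing in ground',
--     22: 'Wing in ground',
--     23: 'Wing in ground',
--     24: 'Wing in ground',
--     25: 'Wing in ground',
--     26: 'Wing in ground',
--     27: 'Wing in ground',
--     28: 'Wing in ground',
--     29: 'Wing in ground',
--     30: 'Fishing',
--     31: 'Towing',
--     32: 'Towing (large)',
--     33: 'Dredging/underwater ops',
--     34: 'Diving ops',
--     35: 'Military ops',
--     36: 'Sailing',
--     37: 'Pleasure craft',
--     40: 'High speed craft',
--     41: 'High speed craft',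
--     42: 'High speed craft',
--     43: 'High speed craft',
--     44: 'High speed craft',
--     45: 'High speed craft',
--     46: 'High speed craft',
--     47: 'High speed craft',
--     48: 'High speed craft',
--     49: 'High speed craft',
--     50: 'Pilot vessel',
--     51: 'Search and rescue',
--     52: 'Tug',
--     53: 'Port tender',
--     54: 'Anti-pollution',
--     55: 'Law enforcement',
--     58: 'Medical transport',
--     59: 'Non-combatant ship',
--     60: 'Passenger',
--     61: 'Passenger',
--     62: 'Passenger',
--     63: 'Passenger',
--     64: 'Passenger',
--     65: 'Passenger',
--     66: 'Passenger',
--     67: 'Passenger',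
--     68: 'Passenger',
--     69: 'Passenger',
--     70: 'Cargo',
--     71: 'Cargo',
--     72: 'Cargo',
--     73: 'Cargo',
--     74: 'Cargo',
--     75: 'Cargo',
--     76: 'Cargo',
--     77: 'Cargo',
--     78: 'Cargo',
--     79: 'Cargo',
--     80: 'Tanker',
--     81: 'Tanker',
--     82: 'Tanker',
--     83: 'Tanker',
--     84: 'Tanker',
--     85: 'Tanker',
--     86: 'Tanker',
--     87: 'Tanker',
--     88: 'Tanker',
--     89: 'Tanker',
--     90: 'Other',
--     91: 'Other',
--     92: 'Other',
--     93: 'Other',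
--     94: 'Other',
--     95: 'Other',
--     96: 'Other',
--     97: 'Other',
--     98: 'Other',
--     99: 'Other',
-- }
--
--
-- def get_ship_type_name(ship_type: int) -> str:
--     """Get human-readable ship type name from AIS type code."""
--     return _SHIP_TYPE_NAMES.get(ship_type, "Unknown")
-- ===== Notes on version B (the rewrite author's own statement) =====
-- stated objective: simpler
-- what changed: Replaced the per-query scan over (lo,hi) range entries by a flat precomputed code-to-name dict (one entry per AIS code) queried with a single .get(ship_type, 'Unknown').
import Mathlib
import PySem

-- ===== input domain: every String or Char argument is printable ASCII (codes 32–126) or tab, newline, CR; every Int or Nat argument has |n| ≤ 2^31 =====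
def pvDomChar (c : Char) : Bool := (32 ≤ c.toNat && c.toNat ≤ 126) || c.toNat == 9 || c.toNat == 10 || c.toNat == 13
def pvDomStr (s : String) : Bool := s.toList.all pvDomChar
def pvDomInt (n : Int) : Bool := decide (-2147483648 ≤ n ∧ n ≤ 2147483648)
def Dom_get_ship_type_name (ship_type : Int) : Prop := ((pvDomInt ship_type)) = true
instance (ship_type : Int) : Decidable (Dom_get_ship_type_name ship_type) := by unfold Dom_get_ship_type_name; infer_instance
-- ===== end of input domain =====

-- ===== PORT A =====
-- B replaces A's per-query scan over (lo,hi) ranges by a flat precomputed code->name dict looked up once (simpler query path).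
def typeRanges : List (Int × Int × String) := [
  ((20 : Int), (29 : Int), "Wing in ground"),
  ((30 : Int), (30 : Int), "Fishing"),
  ((31 : Int), (31 : Int), "Towing"),
  ((32 : Int), (32 : Int), "Towing (large)"),
  ((33 : Int), (33 : Int), "Dredging/underwater ops"),
  ((34 : Int), (34 : Int), "Diving ops"),
  ((35 : Int), (35 : Int), "Military ops"),
  ((36 : Int), (36 : Int), "Sailing"),
  ((37 : Int), (37 : Int), "Pleasure craft"),
  ((40 : Int), (49 : Int), "High speed craft"),
  ((50 : Int), (50 : Int), "Pilot vessel"),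
  ((51 : Int), (51 : Int), "Search and rescue"),
  ((52 : Int), (52 : Int), "Tug"),
  ((53 : Int), (53 : Int), "Port tender"),
  ((54 : Int), (54 : Int), "Anti-pollution"),
  ((55 : Int), (55 : Int), "Law enforcement"),
  ((58 : Int), (58 : Int), "Medical transport"),
  ((59 : Int), (59 : Int), "Non-combatant ship"),
  ((60 : Int), (69 : Int), "Passenger"),
  ((70 : Int), (79 : Int), "Cargo"),
  ((80 : Int), (89 : Int), "Tanker"),
  ((90 : Int), (99 : Int), "Other")]

def shipLoop (ship_type : Int) : List (Int × Int × String) → String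
  | [] => "Unknown"
  | (min_type, max_type, name) :: rest =>
      if min_type ≤ ship_type ∧ ship_type ≤ max_type then name else shipLoop ship_type rest

def get_ship_type_name (ship_type : Int) : String := shipLoop ship_type typeRanges

-- ===== PORT B =====
def shipTypeNames : PySem.Dict Int String := PySem.Dict.mk [
  ((20 : Int), "Wing in ground"),
  ((21 : Int), "Wing in ground"),
  ((22 : Int), "Wing in ground"),
  ((23 : Int), "Wing in ground"),
  ((24 : Int), "Wing in ground"),
  ((25 : Int), "Wing in ground"),
  ((26 : Int), "Wing in ground"),
  ((27 : Int), "Wing in ground"),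
  ((28 : Int), "Wing in ground"),
  ((29 : Int), "Wing in ground"),
  ((30 : Int), "Fishing"),
  ((31 : Int), "Towing"),
  ((32 : Int), "Towing (large)"),
  ((33 : Int), "Dredging/underwater ops"),
  ((34 : Int), "Diving ops"),
  ((35 : Int), "Military ops"),
  ((36 : Int), "Sailing"),
  ((37 : Int), "Pleasure craft"),
  ((40 : Int), "High speed craft"),
  ((41 : Int), "High speed craft"),
  ((42 : Int), "High speed craft"),
  ((43 : Int), "High speed craft"),
  ((44 : Int), "High speed craft"),
  ((45 : Int), "High speed craft"),
  ((46 : Int), "High speed craft"),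
  ((47 : Int), "High speed craft"),
  ((48 : Int), "High speed craft"),
  ((49 : Int), "High speed craft"),
  ((50 : Int), "Pilot vessel"),
  ((51 : Int), "Search and rescue"),
  ((52 : Int), "Tug"),
  ((53 : Int), "Port tender"),
  ((54 : Int), "Anti-pollution"),
  ((55 : Int), "Law enforcement"),
  ((58 : Int), "Medical transport"),
  ((59 : Int), "Non-combatant ship"),
  ((60 : Int), "Passenger"),
  ((61 : Int), "Passenger"),
  ((62 : Int), "Passenger"),
  ((63 : Int), "Passenger"),
  ((64 : Int), "Passenger"),
  ((65 : Int), "Passenger"),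
  ((66 : Int), "Passenger"),
  ((67 : Int), "Passenger"),
  ((68 : Int), "Passenger"),
  ((69 : Int), "Passenger"),
  ((70 : Int), "Cargo"),
  ((71 : Int), "Cargo"),
  ((72 : Int), "Cargo"),
  ((73 : Int), "Cargo"),
  ((74 : Int), "Cargo"),
  ((75 : Int), "Cargo"),
  ((76 : Int), "Cargo"),
  ((77 : Int), "Cargo"),
  ((78 : Int), "Cargo"),
  ((79 : Int), "Cargo"),
  ((80 : Int), "Tanker"),
  ((81 : Int), "Tanker"),
  ((82 : Int), "Tanker"),
  ((83 : Int), "Tanker"),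
  ((84 : Int), "Tanker"),
  ((85 : Int), "Tanker"),
  ((86 : Int), "Tanker"),
  ((87 : Int), "Tanker"),
  ((88 : Int), "Tanker"),
  ((89 : Int), "Tanker"),
  ((90 : Int), "Other"),
  ((91 : Int), "Other"),
  ((92 : Int), "Other"),
  ((93 : Int), "Other"),
  ((94 : Int), "Other"),
  ((95 : Int), "Other"),
  ((96 : Int), "Other"),
  ((97 : Int), "Other"),
  ((98 : Int), "Other"),
  ((99 : Int), "Other")]

def get_ship_type_name_alt (ship_type : Int) : String :=
  shipTypeNames.getD ship_type "Unknown"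

-- ===== PRECONDITION & SPEC =====
def Spec_get_ship_type_name (ship_type : Int) (out : String) : Prop := out = get_ship_type_name_alt ship_type
instance (ship_type : Int) (out : String) : Decidable (Spec_get_ship_type_name ship_type out) := by unfold Spec_get_ship_type_name; infer_instance

-- ===== CLAIM (what is proved, stated in full; the proofs are below) =====
def Claim_equal_get_ship_type_name : Prop := ∀ (ship_type : Int), Dom_get_ship_type_name ship_type → Spec_get_ship_type_name ship_type (get_ship_type_name ship_type)

-- ===== LEMMAS AND PROOFS =====

-- ===== VERDICT (by name: the statement is the Claim_ definition above) =====
-- A's loop yields "Unknown" when every entry's range lies inside [20,99] and t is outside it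
theorem shipLoop_out_of_range (t : Int) (l : List (Int × Int × String))
    (hb : ∀ e ∈ l, 20 ≤ e.1 ∧ e.2.1 ≤ 99) (ht : ¬(20 ≤ t ∧ t ≤ 99)) :
    shipLoop t l = "Unknown" := by
  induction l with
  | nil => rfl
  | cons e rest ih =>
    obtain ⟨lo, hi, name⟩ := e
    have hb0 := hb _ (List.mem_cons_self)
    rw [shipLoop, if_neg (by simp at hb0; omega)]
    exact ih fun e he => hb _ (List.mem_cons_of_mem _ he)

-- first-match lookup in an assoc list whose keys all lie in [20,99] misses any t outside it
theorem get?_out_of_range (t : Int) (l : List (Int × String))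
    (hb : ∀ p ∈ l, 20 ≤ p.1 ∧ p.1 ≤ 99) (ht : ¬(20 ≤ t ∧ t ≤ 99)) :
    (PySem.Dict.mk l).get? t = none := by
  induction l with
  | nil => rfl
  | cons p rest ih =>
    have hb0 := hb _ (List.mem_cons_self)
    rw [PySem.Dict.get?_mk_cons, if_neg (by simp only [beq_iff_eq]; omega)]
    exact ih fun p hp => hb _ (List.mem_cons_of_mem _ hp)

theorem table_bounds : ∀ p ∈ shipTypeNames.items, 20 ≤ p.1 ∧ p.1 ≤ 99 := by decide

theorem range_bounds : ∀ e ∈ typeRanges, 20 ≤ e.1 ∧ e.2.1 ≤ 99 := by decide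

set_option maxHeartbeats 1000000 in
theorem get_ship_type_name_spec : Claim_equal_get_ship_type_name := by
  intro t _
  unfold Spec_get_ship_type_name
  by_cases h : 20 ≤ t ∧ t ≤ 99
  · obtain ⟨h1, h2⟩ := h
    interval_cases t <;> decide
  · show get_ship_type_name t = get_ship_type_name_alt t
    rw [get_ship_type_name, shipLoop_out_of_range t _ range_bounds h,
      get_ship_type_name_alt, PySem.Dict.getD_eq_get?_getD,
      get?_out_of_range t _ table_bounds h]
    rfl
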